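-- pv_equiv track=rewrite | github.com/l0stplains/Tubes3_TheRecruiter | src/search/cv_grouper.py | _looks_like_degree
-- ===== SOURCE A (Python) =====
-- def _looks_like_degree(line: str) -> bool:
--     degree_keywords = [
--         'bachelor', 'master', 'phd', 'doctorate', 'associate', 'diploma',
--         'degree', 'science', 'arts', 'engineering', 'business', 'computer',
--         'bs', 'ba', 'ms', 'ma', 'mba', 'bsc', 'msc', 'beng', 'meng'
--     ]
--
--     line_lower = line.lower()
--     return any(keyword in line_lower for keyword in degree_keywords)
-- ===== SOURCE B (Python) =====
-- _DEGREE_KEYWORDS = [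
--     'bachelor', 'master', 'phd', 'doctorate', 'associate', 'diploma',
--     'degree', 'science', 'arts', 'engineering', 'business', 'computer',
--     'bs', 'ba', 'ms', 'ma', 'mba', 'bsc', 'msc', 'beng', 'meng'
-- ]
--
--
-- def _looks_like_degree(line: str) -> bool:
--     # single left-to-right scan: at each position, test whether ANY keyword
--     # starts there, instead of one full substring search per keyword
--     low = line.lower()
--     return any(low.startswith(kw, i)
--                for i in range(len(low) + 1)
--                for kw in _DEGREE_KEYWORDS)
-- ===== Notes on version B (the rewrite author's own statement) =====
-- stated objective: alternative
-- what changed: B replaces A's per-keyword substring search over the whole line with a single left-to-right scan that, at each position, checks whether any keyword starts there (prefix match), so the line is traversed once position-wise instead of once per keyword.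
import Mathlib
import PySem

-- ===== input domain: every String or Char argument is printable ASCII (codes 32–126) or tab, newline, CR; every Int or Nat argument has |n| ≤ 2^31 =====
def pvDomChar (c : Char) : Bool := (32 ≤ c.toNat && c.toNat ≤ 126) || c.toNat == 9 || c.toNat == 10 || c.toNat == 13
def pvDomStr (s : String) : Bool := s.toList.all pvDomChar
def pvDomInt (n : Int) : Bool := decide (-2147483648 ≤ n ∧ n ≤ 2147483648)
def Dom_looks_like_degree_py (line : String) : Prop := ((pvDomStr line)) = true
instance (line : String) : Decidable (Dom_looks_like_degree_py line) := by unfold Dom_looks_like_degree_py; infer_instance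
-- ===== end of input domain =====

-- B replaces the per-keyword substring search with one positional scan testing
-- every keyword as a prefix at each position (alternative decomposition, same cost).


-- the shared literal keyword list
def pvDegreeKeywords : List String :=
  ["bachelor", "master", "phd", "doctorate", "associate", "diploma",
   "degree", "science", "arts", "engineering", "business", "computer",
   "bs", "ba", "ms", "ma", "mba", "bsc", "msc", "beng", "meng"]

-- ===== PORT A =====
def looks_like_degree_py (line : String) : Bool :=
  let degree_keywords := pvDegreeKeywords
  let line_lower := PySem.Str.lower line
  degree_keywords.any (fun keyword => PySem.Str.isIn keyword line_lower)

-- ===== PORT B =====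
-- the generator 'any(low.startswith(kw, i) for i in range(len(low)+1) for kw in kws)'
-- as structural recursion over the suffixes of the lowered line
def pvScanAny (kws : List (List Char)) : List Char → Bool
  | [] => kws.any (fun kw => kw.isPrefixOf [])
  | c :: rest => kws.any (fun kw => kw.isPrefixOf (c :: rest)) || pvScanAny kws rest

def looks_like_degree_py_alt (line : String) : Bool :=
  pvScanAny (pvDegreeKeywords.map String.toList) (PySem.Chars.lower line.toList)

-- ===== PRECONDITION & SPEC =====
def Spec_looks_like_degree_py (line : String) (out : Bool) : Prop := out = looks_like_degree_py_alt line
instance (line : String) (out : Bool) : Decidable (Spec_looks_like_degree_py line out) := by unfold Spec_looks_like_degree_py; infer_instance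

-- ===== CLAIM (what is proved, stated in full; the proofs are below) =====
def Claim_equal_looks_like_degree_py : Prop := ∀ (line : String), Dom_looks_like_degree_py line → Spec_looks_like_degree_py line (looks_like_degree_py line)

-- ===== LEMMAS AND PROOFS =====

theorem pvScanAny_iff (kws : List (List Char)) (t : List Char) :
    pvScanAny kws t = true ↔ ∃ kw ∈ kws, kw <:+: t := by
  induction t with
  | nil =>
      simp [pvScanAny, List.any_eq_true, List.isPrefixOf_iff_prefix]
  | cons c rest ih =>
      simp only [pvScanAny, Bool.or_eq_true, List.any_eq_true,
        List.isPrefixOf_iff_prefix, ih, List.infix_cons_iff]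
      constructor
      · rintro (⟨kw, hmem, h⟩ | ⟨kw, hmem, h⟩)
        · exact ⟨kw, hmem, Or.inl h⟩
        · exact ⟨kw, hmem, Or.inr h⟩
      · rintro ⟨kw, hmem, h | h⟩
        · exact Or.inl ⟨kw, hmem, h⟩
        · exact Or.inr ⟨kw, hmem, h⟩

-- ===== VERDICT (by name: the statement is the Claim_ definition above) =====
theorem looks_like_degree_py_spec : Claim_equal_looks_like_degree_py := by
  intro line _
  unfold Spec_looks_like_degree_py looks_like_degree_py looks_like_degree_py_alt
  rw [Bool.eq_iff_iff]
  simp only [List.any_eq_true, PySem.Str.isIn_iff_infix, PySem.Str.toList_lower,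
    pvScanAny_iff, List.mem_map]
  constructor
  · rintro ⟨kw, hmem, h⟩; exact ⟨kw.toList, ⟨kw, hmem, rfl⟩, h⟩
  · rintro ⟨_, ⟨kw, hmem, rfl⟩, h⟩; exact ⟨kw, hmem, h⟩
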